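-- pv_equiv track=rewrite | github.com/Hanhur/ComputerNetworks | Checksum/main.py | calculate_ip_checksum
-- ===== SOURCE A (Python) =====
-- def calculate_ip_checksum(data):
--     """Вычисляет 16-битную контрольную сумму в стиле IP (обратный код)"""
--     if isinstance(data, str):
--         data = data.encode('utf-8')
--
--     # Разбиваем данные на 16-битные слова
--     words = []
--     for i in range(0, len(data), 2):
--         if i + 1 < len(data):
--             word = (data[i] << 8) | data[i + 1]
--         else:
--             word = (data[i] << 8) | 0
--         words.append(word)
--
--     # Суммируем все слова с переносом
--     checksum = 0
--     for word in words:
--         checksum += word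
--         checksum = (checksum & 0xFFFF) + (checksum >> 16)
--
--     return (~checksum) & 0xFFFF
-- ===== SOURCE B (Python) =====
-- def calculate_ip_checksum(data):
--     """16-bit IP-style one's-complement checksum via strided byte sums."""
--     if isinstance(data, str):
--         data = data.encode('utf-8')
--     s = (sum(data[0::2]) << 8) + sum(data[1::2])
--     while s >> 16:
--         s = (s & 0xFFFF) + (s >> 16)
--     return (~s) & 0xFFFF
-- ===== Notes on version B (the rewrite author's own statement) =====
-- stated objective: simpler
-- what changed: Replaces the explicit word-building loop and per-word carry folding with two strided byte sums (even-index bytes shifted into the high half plus odd-index bytes) followed by a single while-loop that folds all carries at the end.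
import Mathlib
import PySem

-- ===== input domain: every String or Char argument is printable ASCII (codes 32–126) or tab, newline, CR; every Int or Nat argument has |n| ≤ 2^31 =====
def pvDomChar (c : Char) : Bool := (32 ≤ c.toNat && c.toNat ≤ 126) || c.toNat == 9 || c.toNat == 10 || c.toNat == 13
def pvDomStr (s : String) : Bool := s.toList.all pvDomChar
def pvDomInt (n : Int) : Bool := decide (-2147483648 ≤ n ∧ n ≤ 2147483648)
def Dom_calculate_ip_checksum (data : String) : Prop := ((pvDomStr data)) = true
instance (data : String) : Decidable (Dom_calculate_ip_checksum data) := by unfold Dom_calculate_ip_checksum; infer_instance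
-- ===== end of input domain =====

-- B replaces A's word-building loop with two strided byte sums and a final carry-folding
-- while-loop (objective: simpler); return values agree on all Dom inputs.
-- On Dom (ASCII ≤ 126) `data.encode('utf-8')` is exactly the list of character codes.

-- ===== PORT A =====
-- for i in range(0, len(data), 2): build the 16-bit word at index i (index recursion over the same i's)
def pvAWords (bytes : List Nat) (i : Nat) : List Nat :=
  if i < bytes.length then
    (if i + 1 < bytes.length then (bytes.getD i 0) <<< 8 ||| bytes.getD (i+1) 0
     else (bytes.getD i 0) <<< 8 ||| 0) :: pvAWords bytes (i+2)
  else []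
termination_by bytes.length - i

def calculate_ip_checksum (data : String) : Int :=
  let bytes := data.toList.map (fun c => c.toNat)   -- data.encode('utf-8'): exact on ASCII (Dom)
  let words := pvAWords bytes 0
  let checksum := words.foldl (fun c w => ((c + w) &&& 0xFFFF) + ((c + w) >>> 16)) 0
  PySem.Int.band (Int.not (checksum : Int)) 0xFFFF

-- ===== PORT B =====
-- data[0::2] (even indices); data[1::2] is pvStride2 of the tail
def pvStride2 (l : List Nat) : List Nat :=
  match l with
  | [] => []
  | [a] => [a]
  | a :: _ :: r => a :: pvStride2 r

-- while s >> 16: s = (s & 0xFFFF) + (s >> 16)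
def pvFoldCarries (s : Nat) : Nat :=
  if s >>> 16 = 0 then s else pvFoldCarries ((s &&& 0xFFFF) + (s >>> 16))
termination_by s
decreasing_by
  have h1 : s >>> 16 = s / 65536 := Nat.shiftRight_eq_div_pow s 16
  have h2 : s &&& 0xFFFF = s % 65536 := by
    have := Nat.and_two_pow_sub_one_eq_mod s 16; norm_num at this; exact this
  rw [h1, h2]; rename_i h; rw [h1] at h; omega

def calculate_ip_checksum_alt (data : String) : Int :=
  let bytes := data.toList.map (fun c => c.toNat)   -- data.encode('utf-8'): exact on ASCII (Dom)
  let s := ((pvStride2 bytes).sum <<< 8) + (pvStride2 bytes.tail).sum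
  PySem.Int.band (Int.not (pvFoldCarries s : Int)) 0xFFFF

-- ===== PRECONDITION & SPEC =====
def Spec_calculate_ip_checksum (data : String) (out : Int) : Prop := out = calculate_ip_checksum_alt data
instance (data : String) (out : Int) : Decidable (Spec_calculate_ip_checksum data out) := by unfold Spec_calculate_ip_checksum; infer_instance

-- ===== CLAIM (what is proved, stated in full; the proofs are below) =====
def Claim_equal_calculate_ip_checksum : Prop := ∀ (data : String), Dom_calculate_ip_checksum data → Spec_calculate_ip_checksum data (calculate_ip_checksum data)

-- ===== LEMMAS AND PROOFS =====

-- the unique representative in [0, 65535] of s mod 65535 that is 0 only for s = 0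
def pvOnec (t : Nat) : Nat := if t = 0 then 0 else (t - 1) % 65535 + 1

theorem pvOnec_facts (t : Nat) :
    pvOnec t ≤ 65535 ∧ pvOnec t % 65535 = t % 65535 ∧ (pvOnec t = 0 ↔ t = 0) := by
  unfold pvOnec; split <;> omega

-- one step of A's fold, starting from a canonical accumulator, stays canonical
theorem pvStep_onec (t w : Nat) (hw : w ≤ 65535) :
    ((pvOnec t + w) &&& 0xFFFF) + ((pvOnec t + w) >>> 16) = pvOnec (t + w) := by
  obtain ⟨h3a, h3b, h3c⟩ := pvOnec_facts t
  obtain ⟨h4a, h4b, h4c⟩ := pvOnec_facts (t + w)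
  have h1 : (pvOnec t + w) >>> 16 = (pvOnec t + w) / 65536 := by
    have := Nat.shiftRight_eq_div_pow (pvOnec t + w) 16; norm_num at this; exact this
  have h2 : (pvOnec t + w) &&& 0xFFFF = (pvOnec t + w) % 65536 := by
    have := Nat.and_two_pow_sub_one_eq_mod (pvOnec t + w) 16; norm_num at this; exact this
  rw [h1, h2]
  omega

theorem pvFoldA_onec (ws : List Nat) (hws : ∀ w ∈ ws, w ≤ 65535) (t : Nat) :
    ws.foldl (fun c w => ((c + w) &&& 0xFFFF) + ((c + w) >>> 16)) (pvOnec t)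
      = pvOnec (t + ws.sum) := by
  induction ws generalizing t with
  | nil => simp
  | cons w r ih =>
    simp only [List.foldl_cons, List.sum_cons]
    rw [pvStep_onec t w (hws w (by simp))]
    rw [ih (fun x hx => hws x (by simp [hx])) (t + w)]
    ring_nf

theorem pvFoldCarries_eq_onec (s : Nat) : pvFoldCarries s = pvOnec s := by
  induction s using Nat.strong_induction_on with
  | _ s ih =>
    rw [pvFoldCarries]
    have h1 : s >>> 16 = s / 65536 := by
      have := Nat.shiftRight_eq_div_pow s 16; norm_num at this; exact this
    have h2 : s &&& 0xFFFF = s % 65536 := by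
      have := Nat.and_two_pow_sub_one_eq_mod s 16; norm_num at this; exact this
    obtain ⟨ha, hb, hc⟩ := pvOnec_facts s
    split
    · rename_i h; rw [h1] at h; omega
    · rename_i h; rw [h1] at h
      rw [h1, h2, ih (s % 65536 + s / 65536) (by omega)]
      obtain ⟨ha', hb', hc'⟩ := pvOnec_facts (s % 65536 + s / 65536)
      omega

-- shifting A's index loop past a consumed pair
theorem pvAWords_shift (a b : Nat) : ∀ k i (r : List Nat), r.length - i ≤ k →
    pvAWords (a :: b :: r) (i + 2) = pvAWords r i := by
  intro k
  induction k with
  | zero =>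
    intro i r h
    conv_lhs => rw [pvAWords]
    conv_rhs => rw [pvAWords]
    simp only [List.length_cons]
    rw [if_neg (by omega), if_neg (by omega)]
  | succ k ih =>
    intro i r h
    conv_lhs => rw [pvAWords]
    conv_rhs => rw [pvAWords]
    simp only [List.length_cons]
    by_cases hi : i < r.length
    · rw [if_pos (by omega), if_pos hi]
      have e1 : (a :: b :: r).getD (i + 2) 0 = r.getD i 0 := by simp
      have e2 : (a :: b :: r).getD (i + 2 + 1) 0 = r.getD (i + 1) 0 := by simp
      rw [e1, ih (i + 2) r (by omega)]
      by_cases h2 : i + 1 < r.length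
      · rw [if_pos (by omega), if_pos h2, e2]
      · rw [if_neg (by omega), if_neg h2]
    · rw [if_neg (by omega), if_neg hi]

theorem pvAWords_zero : ∀ bytes : List Nat,
    pvAWords bytes 0 =
      match bytes with
      | [] => []
      | [a] => [a <<< 8 ||| 0]
      | a :: b :: r => (a <<< 8 ||| b) :: pvAWords r 0 := by
  intro bytes
  match bytes with
  | [] => rw [pvAWords]; simp
  | [a] =>
    conv_lhs => rw [pvAWords]
    simp only [List.length_cons, List.length_nil, List.getD_cons_zero]
    rw [if_pos (by omega), if_neg (by omega)]
    conv_lhs => rw [pvAWords]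
    simp only [List.length_cons, List.length_nil]
    rw [if_neg (by omega)]
  | a :: b :: r =>
    conv_lhs => rw [pvAWords]
    simp only [List.length_cons, List.getD_cons_zero, List.getD_cons_succ]
    rw [if_pos (by omega), if_pos (by omega)]
    have := pvAWords_shift a b r.length 0 r (by omega)
    simp only [Nat.zero_add] at this
    rw [this]

theorem pvWord_le (a b : Nat) (ha : a ≤ 255) (hb : b ≤ 255) : a <<< 8 ||| b ≤ 65535 := by
  have h1 : a <<< 8 < 2 ^ 16 := by rw [Nat.shiftLeft_eq]; omega
  have h2 : b < 2 ^ 16 := by omega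
  have := Nat.or_lt_two_pow h1 h2
  omega

theorem pvWord_eq_add (a b : Nat) (hb : b ≤ 255) : a <<< 8 ||| b = a * 256 + b := by
  rw [← Nat.shiftLeft_add_eq_or_of_lt (by omega : b < 2 ^ 8)]
  rw [Nat.shiftLeft_eq]

theorem pvAWords_structure (bytes : List Nat) (hb : ∀ x ∈ bytes, x ≤ 255) :
    (∀ w ∈ pvAWords bytes 0, w ≤ 65535) ∧
    (pvAWords bytes 0).sum = (pvStride2 bytes).sum * 256 + (pvStride2 bytes.tail).sum := by
  induction bytes using pvStride2.induct with
  | case1 => rw [pvAWords_zero]; simp [pvStride2]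
  | case2 a =>
    rw [pvAWords_zero]
    have ha : a ≤ 255 := hb a (by simp)
    constructor
    · intro w hw; simp at hw; subst hw
      simpa using pvWord_le a 0 ha (by omega)
    · simp [pvStride2, pvWord_eq_add a 0 (by omega)]
  | case3 a b r ih =>
    rw [pvAWords_zero]
    have ha : a ≤ 255 := hb a (by simp)
    have hbb : b ≤ 255 := hb b (by simp)
    have ihr := ih (fun x hx => hb x (by simp [hx]))
    constructor
    · intro w hw
      simp only [List.mem_cons] at hw
      rcases hw with h | h
      · subst h; exact pvWord_le a b ha hbb
      · exact ihr.1 w h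
    · simp only [List.sum_cons, List.tail_cons, pvStride2, List.sum_cons, ihr.2,
        pvWord_eq_add a b hbb]
      have : (pvStride2 (b :: r)).sum = b + (pvStride2 r.tail).sum := by
        match r with
        | [] => simp [pvStride2]
        | c :: r' => simp [pvStride2]
      rw [this]
      ring

-- ===== VERDICT (by name: the statement is the Claim_ definition above) =====
theorem calculate_ip_checksum_spec : Claim_equal_calculate_ip_checksum := by
  intro data hdom
  unfold Spec_calculate_ip_checksum calculate_ip_checksum calculate_ip_checksum_alt
  have hb : ∀ x ∈ data.toList.map (fun c => c.toNat), x ≤ 255 := by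
    intro x hx
    simp only [List.mem_map] at hx
    obtain ⟨c, hc, rfl⟩ := hx
    have := List.all_eq_true.mp hdom c hc
    simp only [pvDomChar, Bool.or_eq_true, Bool.and_eq_true, decide_eq_true_eq,
      beq_iff_eq] at this
    omega
  set bytes := data.toList.map (fun c => c.toNat) with hbytes
  have hs := pvAWords_structure bytes hb
  have hA := pvFoldA_onec (pvAWords bytes 0) hs.1 0
  have h0 : pvOnec 0 = 0 := rfl
  rw [h0, Nat.zero_add] at hA
  have hsum : ((pvStride2 bytes).sum <<< 8) + (pvStride2 bytes.tail).sum
      = (pvAWords bytes 0).sum := by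
    rw [hs.2, Nat.shiftLeft_eq]
  simp only [hA, hsum, pvFoldCarries_eq_onec]
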